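-- pv_equiv track=rewrite | github.com/vbukovska/SoftUni | Python_advanced/Ex3_multidimentional_lists/knight_game.py | knight_game_2
-- ===== SOURCE A (Python) =====
-- def available_moves(dim, row, column):
--     curr_moves = []
--     search_knight_r = [-2, -2, -1, -1, 1, 1, 2, 2]
--     search_knight_c = [-1, 1, -2, 2, -2, 2, -1, 1]
--     for search_index in range(len(search_knight_c)):
--         look_in_r = row + search_knight_r[search_index]
--         look_in_c = column + search_knight_c[search_index]
--         if look_in_r in range(dim) and look_in_c in range(dim):
--             curr_moves.append((look_in_r, look_in_c))
--     return curr_moves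
--
-- def max_removal(dim, moves):
--     max_removals = 0
--     max_row = 0
--     max_column = 0
--     for r_move in range(dim):
--         for c_move in range(dim):
--             if max_removals < moves[r_move][c_move]:
--                 max_removals = moves[r_move][c_move]
--                 max_row = r_move
--                 max_column = c_move
--     return max_removals, max_row, max_column
--
-- def knight_game_2(matrix, moves, number_moves):
--     dim = len(moves)
--     max_removals, r, c = max_removal(dim, moves)
--     if max_removals > 0:
--         curr_moves = available_moves(dim, r, c)
--         moves[r][c] = 0
--         matrix[r][c] = '0'
--         number_moves += 1
--         for move in curr_moves:
--             move_rows = move[0]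
--             move_columns = move[1]
--             if moves[move_rows][move_columns] > 0:
--                 moves[move_rows][move_columns] -= 1
--         number_moves = knight_game_2(matrix, moves, number_moves)
--     return number_moves
-- ===== SOURCE B (Python) =====
-- # Iterative greedy on a flat 1-D board with a move counter, instead of A's recursion
-- # over nested lists; return-value equivalence only: A mutates matrix/moves in place, B does not.
-- def knight_game_2(matrix, moves, number_moves):
--     dim = len(moves)
--     n = dim * dim
--     flat = [moves[i // dim][i % dim] for i in range(n)]
--     deltas = ((-2, -1), (-2, 1), (-1, -2), (-1, 2), (1, -2), (1, 2), (2, -1), (2, 1))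
--     count = 0
--     for _ in range(n + 1):  # at most n removals: each zeroes a distinct cell for good
--         best = 0
--         best_i = -1
--         for i in range(n):
--             if best < flat[i]:
--                 best = flat[i]
--                 best_i = i
--         if best_i < 0:
--             break
--         flat[best_i] = 0
--         r, c = divmod(best_i, dim)
--         for dr, dc in deltas:
--             nr, nc = r + dr, c + dc
--             if 0 <= nr < dim and 0 <= nc < dim and flat[nr * dim + nc] > 0:
--                 flat[nr * dim + nc] -= 1
--         count += 1
--     return number_moves + count
-- ===== Notes on version B (the rewrite author's own statement) =====
-- stated objective: alternative
-- what changed: Replaces A's recursion over two nested lists (helper scan max_removal + helper move list available_moves, mutating matrix and moves in place) by an iterative loop with a removal counter over a flat 1-D board indexed by r*dim+c, with inline delta pairs and divmod; return value only, B does not mutate its arguments.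
-- outside the precondition, e.g. on knight_game_2([['a'], ['b']], [[1, 0], [0, 0]], 0): A returns 1, B returns 1
import Mathlib
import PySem

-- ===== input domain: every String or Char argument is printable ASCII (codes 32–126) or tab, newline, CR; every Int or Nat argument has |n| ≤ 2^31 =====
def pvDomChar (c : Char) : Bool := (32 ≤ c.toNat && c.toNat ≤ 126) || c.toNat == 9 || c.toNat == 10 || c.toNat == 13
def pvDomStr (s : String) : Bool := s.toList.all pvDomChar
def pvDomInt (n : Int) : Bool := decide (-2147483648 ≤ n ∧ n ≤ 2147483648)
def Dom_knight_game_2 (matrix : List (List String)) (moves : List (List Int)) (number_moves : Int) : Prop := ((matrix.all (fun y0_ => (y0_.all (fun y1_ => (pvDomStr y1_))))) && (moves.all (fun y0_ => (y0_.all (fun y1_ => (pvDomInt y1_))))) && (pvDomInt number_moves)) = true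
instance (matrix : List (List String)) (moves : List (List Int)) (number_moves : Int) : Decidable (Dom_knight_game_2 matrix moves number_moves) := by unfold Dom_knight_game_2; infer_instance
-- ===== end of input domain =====

-- B replaces A's nested-list recursion by an iterative counter loop over a flat 1-D board (alternative decomposition; return value only — A mutates matrix/moves, B does not).

-- ===== PORT A =====
-- moves[r][c] read; exact for the in-range nonnegative indices A uses under Pre_
def pvGridGet (moves : List (List Int)) (r c : Int) : Int :=
  PySem.List.pyGetD (PySem.List.pyGetD moves r []) c 0

-- moves[r][c] = v; exact for the in-range nonnegative indices A uses under Pre_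
def pvGridSet (moves : List (List Int)) (r c : Int) (v : Int) : List (List Int) :=
  PySem.List.pySetD moves r (PySem.List.pySetD (PySem.List.pyGetD moves r []) c v)

-- matrix[r][c] = '0'; same remark
def pvStrGridSet (matrix : List (List String)) (r c : Int) (v : String) : List (List String) :=
  PySem.List.pySetD matrix r (PySem.List.pySetD (PySem.List.pyGetD matrix r []) c v)

def available_moves_port (dim row column : Int) : List (Int × Int) :=
  let search_knight_r : List Int := [-2, -2, -1, -1, 1, 1, 2, 2]
  let search_knight_c : List Int := [-1, 1, -2, 2, -2, 2, -1, 1]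
  (PySem.List.pyRange 0 8 1).foldl (fun curr_moves search_index =>
    let look_in_r := row + PySem.List.pyGetD search_knight_r search_index 0
    let look_in_c := column + PySem.List.pyGetD search_knight_c search_index 0
    if 0 ≤ look_in_r ∧ look_in_r < dim ∧ 0 ≤ look_in_c ∧ look_in_c < dim then
      curr_moves ++ [(look_in_r, look_in_c)]
    else curr_moves) []

def max_removal_port (dim : Int) (moves : List (List Int)) : Int × Int × Int :=
  (PySem.List.pyRange 0 dim 1).foldl (fun st r_move =>
    (PySem.List.pyRange 0 dim 1).foldl (fun st c_move =>
      if st.1 < pvGridGet moves r_move c_move then (pvGridGet moves r_move c_move, r_move, c_move)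
      else st) st) (0, 0, 0)

-- the recursion of knight_game_2; fuel dim*dim+1 only makes it total (each pass zeroes a distinct cell)
def pvKnightRec (fuel : Nat) (matrix : List (List String)) (moves : List (List Int)) (number_moves : Int) : Int :=
  match fuel with
  | 0 => number_moves
  | fuel + 1 =>
    let dim : Int := moves.length
    let mrc := max_removal_port dim moves
    if mrc.1 > 0 then
      let curr_moves := available_moves_port dim mrc.2.1 mrc.2.2
      let moves1 := pvGridSet moves mrc.2.1 mrc.2.2 0
      let matrix1 := pvStrGridSet matrix mrc.2.1 mrc.2.2 "0"
      let moves2 := curr_moves.foldl (fun mv move =>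
        if pvGridGet mv move.1 move.2 > 0 then
          pvGridSet mv move.1 move.2 (pvGridGet mv move.1 move.2 - 1)
        else mv) moves1
      pvKnightRec fuel matrix1 moves2 (number_moves + 1)
    else number_moves

def knight_game_2 (matrix : List (List String)) (moves : List (List Int)) (number_moves : Int) : Int :=
  pvKnightRec (moves.length * moves.length + 1) matrix moves number_moves

-- ===== PORT B =====
-- Source B's read moves[i // dim][i % dim]; exact for the in-range nonnegative indices B uses under Pre_
def pvBGet (moves : List (List Int)) (r c : Int) : Int :=
  PySem.List.pyGetD (PySem.List.pyGetD moves r []) c 0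

def pvDeltas : List (Int × Int) := [(-2, -1), (-2, 1), (-1, -2), (-1, 2), (1, -2), (1, 2), (2, -1), (2, 1)]

-- the inner scan 'for i in range(n): if best < flat[i]: …' of Source B
def pvScan (n : Int) (flat : List Int) : Int × Int :=
  (PySem.List.pyRange 0 n 1).foldl (fun st i =>
    if st.1 < PySem.List.pyGetD flat i 0 then (PySem.List.pyGetD flat i 0, i) else st) (0, -1)

-- the 'for _ in range(n+1)' loop of Source B with its break, fuel = the trip count n+1
def pvBLoop (fuel : Nat) (dim : Int) (flat : List Int) (count : Int) : Int :=
  match fuel with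
  | 0 => count
  | fuel + 1 =>
    let bi := (pvScan (dim * dim) flat).2
    if bi < 0 then count
    else
      let flat1 := PySem.List.pySetD flat bi 0
      let r := PySem.Int.floordiv bi dim
      let c := PySem.Int.mod bi dim
      let flat2 := pvDeltas.foldl (fun fl d =>
        let nr := r + d.1
        let nc := c + d.2
        if 0 ≤ nr ∧ nr < dim ∧ 0 ≤ nc ∧ nc < dim ∧ PySem.List.pyGetD fl (nr * dim + nc) 0 > 0 then
          PySem.List.pySetD fl (nr * dim + nc) (PySem.List.pyGetD fl (nr * dim + nc) 0 - 1)
        else fl) flat1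
      pvBLoop fuel dim flat2 (count + 1)

def knight_game_2_alt (matrix : List (List String)) (moves : List (List Int)) (number_moves : Int) : Int :=
  let dim : Int := moves.length
  let n : Int := dim * dim
  let flat := (PySem.List.pyRange 0 n 1).map (fun i =>
    pvBGet moves (PySem.Int.floordiv i dim) (PySem.Int.mod i dim))
  number_moves + pvBLoop (n + 1).toNat dim flat 0

-- ===== PRECONDITION & SPEC =====
def pvHasPositive (moves : List (List Int)) : Bool :=
  moves.any (fun row => (row.take moves.length).any (fun v => decide (0 < v)))

-- Pre_ excludes inputs where A raises IndexError: a moves row shorter than len(moves), or a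
-- positive board with matrix not covering the dim×dim square; the matrix clause is conservative
-- (it also excludes some ragged matrices on which A's selected cells happen to stay in range and A returns).
def Pre_knight_game_2 (matrix : List (List String)) (moves : List (List Int)) (number_moves : Int) : Prop :=
  (∀ row ∈ moves, moves.length ≤ row.length) ∧
  (pvHasPositive moves = true →
    moves.length ≤ matrix.length ∧ ∀ row ∈ matrix.take moves.length, moves.length ≤ row.length)

instance (matrix : List (List String)) (moves : List (List Int)) (number_moves : Int) : Decidable (Pre_knight_game_2 matrix moves number_moves) := by unfold Pre_knight_game_2; infer_instance

def pvWitness_knight_game_2 : List (List String) × List (List Int) × Int :=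
  ([["a", "b"], ["c", "d"]], [[1, 0], [0, 2]], 0)

def Spec_knight_game_2 (matrix : List (List String)) (moves : List (List Int)) (number_moves : Int) (out : Int) : Prop := out = knight_game_2_alt matrix moves number_moves
instance (matrix : List (List String)) (moves : List (List Int)) (number_moves : Int) (out : Int) : Decidable (Spec_knight_game_2 matrix moves number_moves out) := by unfold Spec_knight_game_2; infer_instance

-- ===== CLAIM (what is proved, stated in full; the proofs are below) =====
def Claim_equal_knight_game_2 : Prop := ∀ (matrix : List (List String)) (moves : List (List Int)) (number_moves : Int), Dom_knight_game_2 matrix moves number_moves → Pre_knight_game_2 matrix moves number_moves → Spec_knight_game_2 matrix moves number_moves (knight_game_2 matrix moves number_moves)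

-- ===== LEMMAS AND PROOFS =====
def pvFlatten (dim : Int) (moves : List (List Int)) : List Int :=
  (PySem.List.pyRange 0 (dim * dim) 1).map (fun i =>
    pvBGet moves (PySem.Int.floordiv i dim) (PySem.Int.mod i dim))

theorem pvBGet_eq : pvBGet = pvGridGet := rfl

theorem pv_fdiv_eq {r c D : Int} (hr : 0 ≤ r) (hr' : r < D) (hc : 0 ≤ c) (hc' : c < D) :
    PySem.Int.floordiv (r * D + c) D = r ∧ PySem.Int.mod (r * D + c) D = c := by
  have hD : 0 < D := lt_of_le_of_lt hc hc'
  have h1 : PySem.Int.floordiv (r * D + c) D = r :=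
    (PySem.Int.floordiv_eq_iff_of_pos hD).2 ⟨by nlinarith, by nlinarith⟩
  have h2 := PySem.Int.floordiv_mul_add_mod (r * D + c) D
  rw [h1] at h2
  exact ⟨h1, by linarith⟩

theorem pv_fdiv_bounds {i D : Int} (h0 : 0 ≤ i) (h1 : i < D * D) (hD : 0 < D) :
    0 ≤ PySem.Int.floordiv i D ∧ PySem.Int.floordiv i D < D ∧
    0 ≤ PySem.Int.mod i D ∧ PySem.Int.mod i D < D ∧
    PySem.Int.floordiv i D * D + PySem.Int.mod i D = i := by
  have hm0 := PySem.Int.mod_nonneg i hD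
  have hm1 := PySem.Int.mod_lt i hD
  have hid := PySem.Int.floordiv_mul_add_mod i D
  refine ⟨by nlinarith, by nlinarith, hm0, hm1, hid⟩

theorem pv_flat_get (moves : List (List Int)) {D i : Int} (h0 : 0 ≤ i) (h1 : i < D * D) :
    PySem.List.pyGetD (pvFlatten D moves) i 0 =
      pvGridGet moves (PySem.Int.floordiv i D) (PySem.Int.mod i D) := by
  unfold pvFlatten
  exact PySem.List.pyGetD_map_pyRange_of_nonneg _ _ _ _ h0 h1

theorem pv_available_eq (D r c : Int) :
    available_moves_port D r c =
      (pvDeltas.filter (fun dd => decide (0 ≤ r + dd.1 ∧ r + dd.1 < D ∧ 0 ≤ c + dd.2 ∧ c + dd.2 < D))).map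
        (fun dd => (r + dd.1, c + dd.2)) := by
  have hz : List.zip ([-2, -2, -1, -1, 1, 1, 2, 2] : List Int) ([-1, 1, -2, 2, -2, 2, -1, 1] : List Int)
      = pvDeltas := by decide
  unfold available_moves_port
  rw [show (PySem.List.pyRange 0 8 1)
      = PySem.List.pyRange 0 ((List.zip ([-2, -2, -1, -1, 1, 1, 2, 2] : List Int)
          ([-1, 1, -2, 2, -2, 2, -1, 1] : List Int)).length : Int) 1 from by decide]
  rw [PySem.List.foldl_congr_mem _ _
      (fun curr j => if 0 ≤ r + (PySem.List.pyGetD (List.zip ([-2, -2, -1, -1, 1, 1, 2, 2] : List Int)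
            ([-1, 1, -2, 2, -2, 2, -1, 1] : List Int)) j (0, 0)).1 ∧
          r + (PySem.List.pyGetD (List.zip ([-2, -2, -1, -1, 1, 1, 2, 2] : List Int)
            ([-1, 1, -2, 2, -2, 2, -1, 1] : List Int)) j (0, 0)).1 < D ∧
          0 ≤ c + (PySem.List.pyGetD (List.zip ([-2, -2, -1, -1, 1, 1, 2, 2] : List Int)
            ([-1, 1, -2, 2, -2, 2, -1, 1] : List Int)) j (0, 0)).2 ∧
          c + (PySem.List.pyGetD (List.zip ([-2, -2, -1, -1, 1, 1, 2, 2] : List Int)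
            ([-1, 1, -2, 2, -2, 2, -1, 1] : List Int)) j (0, 0)).2 < D then
        curr ++ [(r + (PySem.List.pyGetD (List.zip ([-2, -2, -1, -1, 1, 1, 2, 2] : List Int)
            ([-1, 1, -2, 2, -2, 2, -1, 1] : List Int)) j (0, 0)).1,
          c + (PySem.List.pyGetD (List.zip ([-2, -2, -1, -1, 1, 1, 2, 2] : List Int)
            ([-1, 1, -2, 2, -2, 2, -1, 1] : List Int)) j (0, 0)).2)] else curr) _ ?_]
  · rw [PySem.List.foldl_pyRange_zero_pyGetD'
      (List.zip ([-2, -2, -1, -1, 1, 1, 2, 2] : List Int) ([-1, 1, -2, 2, -2, 2, -1, 1] : List Int))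
      (0, 0)
      (fun curr (dd : Int × Int) => if 0 ≤ r + dd.1 ∧ r + dd.1 < D ∧ 0 ≤ c + dd.2 ∧ c + dd.2 < D then
        curr ++ [(r + dd.1, c + dd.2)] else curr) []]
    rw [hz, PySem.List.foldl_append_ite
      (fun (dd : Int × Int) => 0 ≤ r + dd.1 ∧ r + dd.1 < D ∧ 0 ≤ c + dd.2 ∧ c + dd.2 < D)
      (fun dd => (r + dd.1, c + dd.2)) pvDeltas []]
    simp
  · intro acc j hj
    have hj' : 0 ≤ j ∧ j < 8 := by
      have := PySem.List.mem_pyRange_one.mp hj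
      constructor <;> [exact this.1; exact lt_of_lt_of_le this.2 (by norm_num)]
    obtain ⟨n, rfl⟩ : ∃ n : Nat, j = (n : Int) := ⟨j.toNat, (Int.toNat_of_nonneg hj'.1).symm⟩
    have hn : n < 8 := by exact_mod_cast hj'.2
    interval_cases n <;> rfl

theorem pv_get_set (moves : List (List Int)) (r c r' c' v : Int)
    (hr0 : 0 ≤ r) (hr1 : r < (moves.length : Int))
    (hc0 : 0 ≤ c) (hc1 : c < ((PySem.List.pyGetD moves r []).length : Int))
    (hr'0 : 0 ≤ r') (hc'0 : 0 ≤ c') :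
    pvGridGet (pvGridSet moves r c v) r' c' =
      if r' = r ∧ c' = c then v else pvGridGet moves r' c' := by
  obtain ⟨rn, rfl⟩ : ∃ n : Nat, r = (n : Int) := ⟨r.toNat, (Int.toNat_of_nonneg hr0).symm⟩
  obtain ⟨cn, rfl⟩ : ∃ n : Nat, c = (n : Int) := ⟨c.toNat, (Int.toNat_of_nonneg hc0).symm⟩
  obtain ⟨rn', rfl⟩ : ∃ n : Nat, r' = (n : Int) := ⟨r'.toNat, (Int.toNat_of_nonneg hr'0).symm⟩
  obtain ⟨cn', rfl⟩ : ∃ n : Nat, c' = (n : Int) := ⟨c'.toNat, (Int.toNat_of_nonneg hc'0).symm⟩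
  have hrlen : rn < moves.length := by exact_mod_cast hr1
  have hclen : cn < (PySem.List.pyGetD moves (rn : Int) []).length := by exact_mod_cast hc1
  unfold pvGridGet pvGridSet
  rw [PySem.List.pyGetD_pySetD_natCast _ rn rn' _ _ hrlen]
  by_cases h : rn' = rn
  · subst h
    rw [if_pos (rfl : rn' = rn')]
    rw [PySem.List.pyGetD_pySetD_natCast _ cn cn' _ _ hclen]
    by_cases h2 : cn' = cn
    · subst h2; simp
    · simp [h2]
  · simp [h]

theorem pv_rows_set (moves : List (List Int)) (r c v : Int) (d : Nat)
    (hd : moves.length = d) (hrows : ∀ row ∈ moves, d ≤ row.length)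
    (hr0 : 0 ≤ r) (hr1 : r < (d : Int)) (hc0 : 0 ≤ c) :
    (pvGridSet moves r c v).length = d ∧ ∀ row ∈ pvGridSet moves r c v, d ≤ row.length := by
  have hrlen : r.toNat < moves.length := by omega
  have hmem : PySem.List.pyGetD moves r [] ∈ moves := by
    rw [PySem.List.pyGetD_eq_getElem _ _ hr0 (by omega)]
    exact List.getElem_mem _
  constructor
  · unfold pvGridSet; rw [PySem.List.length_pySetD]; exact hd
  · intro row hrow
    unfold pvGridSet at hrow
    rw [PySem.List.pySetD_of_nonneg _ _ hr0] at hrow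
    rcases List.mem_or_eq_of_mem_set hrow with h | h
    · exact hrows row h
    · rw [h, PySem.List.length_pySetD]
      exact hrows _ hmem

theorem pv_flatten_length (D : Int) (moves : List (List Int)) :
    (pvFlatten D moves).length = (D * D).toNat := by
  unfold pvFlatten
  rw [List.length_map, PySem.List.length_pyRange_one]
  omega

theorem pv_flatten_set (moves : List (List Int)) (r c v : Int) (d : Nat)
    (hd : moves.length = d) (hrows : ∀ row ∈ moves, d ≤ row.length)
    (hr0 : 0 ≤ r) (hr1 : r < (d : Int)) (hc0 : 0 ≤ c) (hc1 : c < (d : Int)) :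
    pvFlatten (d : Int) (pvGridSet moves r c v) =
      PySem.List.pySetD (pvFlatten (d : Int) moves) (r * (d : Int) + c) v := by
  have hD : (0 : Int) < d := lt_of_le_of_lt hc0 hc1
  have hidx0 : 0 ≤ r * (d : Int) + c := by nlinarith
  have hidx1 : r * (d : Int) + c < (d : Int) * d := by nlinarith
  rw [PySem.List.pySetD_of_nonneg _ _ hidx0]
  apply List.ext_getElem
  · rw [pv_flatten_length, List.length_set, pv_flatten_length]
  · intro k hk1 hk2
    have hk : (k : Int) < (d : Int) * d := by
      have := hk1; rw [pv_flatten_length] at this; omega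
    have hb := pv_fdiv_bounds (i := (k : Int)) (by positivity) hk hD
    -- left side: element of the map
    unfold pvFlatten
    rw [List.getElem_map, PySem.List.getElem_pyRange_one, List.getElem_set, List.getElem_map,
      PySem.List.getElem_pyRange_one]
    simp only [zero_add, pvBGet_eq]
    have hc1' : c < ((PySem.List.pyGetD moves r []).length : Int) := by
      have hmem : PySem.List.pyGetD moves r [] ∈ moves := by
        rw [PySem.List.pyGetD_eq_getElem _ _ hr0 (by omega)]
        exact List.getElem_mem _
      have := hrows _ hmem
      omega
    rw [pv_get_set moves r c _ _ v hr0 (by omega) hc0 hc1' hb.1 hb.2.2.1]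
    by_cases heq : (r * (d : Int) + c).toNat = k
    · have hk' : (k : Int) = r * (d : Int) + c := by omega
      have hfd := pv_fdiv_eq hr0 hr1 hc0 hc1
      rw [if_pos heq, if_pos]
      rw [hk', hfd.1, hfd.2]; exact ⟨rfl, rfl⟩
    · rw [if_neg heq, if_neg]
      intro hcontra
      apply heq
      have : (k : Int) = r * (d : Int) + c := by
        have := hb.2.2.2.2
        rw [hcontra.1, hcontra.2] at this
        omega
      omega

theorem pv_foldl_rel {α β γ : Type} (R : β → γ → Prop) (l : List α) (f : β → α → β)
    (g : γ → α → γ) {b : β} {c : γ} (hR : R b c)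
    (hstep : ∀ b' c' x, x ∈ l → R b' c' → R (f b' x) (g c' x)) :
    R (l.foldl f b) (l.foldl g c) := by
  induction l generalizing b c with
  | nil => exact hR
  | cons x xs ih =>
    exact ih (hstep b c x List.mem_cons_self hR)
      (fun b' c' y hy => hstep b' c' y (List.mem_cons_of_mem _ hy))

theorem pv_range_mul (m n : Nat) :
    List.range (m * n) = (List.range m).flatMap (fun r => (List.range n).map (fun c => r * n + c)) := by
  induction m with
  | zero => simp
  | succ m ih =>
    rw [Nat.succ_mul, List.range_add, List.range_succ, List.flatMap_append, ih]
    simp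

def pvRel (D : Int) (s : Int × Int × Int) (t : Int × Int) : Prop :=
  s.1 = t.1 ∧ ((t.2 = -1 ∧ s.1 = 0 ∧ s.2.1 = 0 ∧ s.2.2 = 0) ∨
    (0 ≤ s.2.1 ∧ s.2.1 < D ∧ 0 ≤ s.2.2 ∧ s.2.2 < D ∧ t.2 = s.2.1 * D + s.2.2 ∧ 0 < s.1))

theorem pv_scan_corr (moves : List (List Int)) (d : Nat) (hd : moves.length = d) :
    pvRel (d : Int) (max_removal_port (moves.length : Int) moves)
      (pvScan ((d : Int) * (d : Int)) (pvFlatten (d : Int) moves)) := by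
  unfold max_removal_port pvScan
  rw [hd]
  rw [show ((d : Int) * (d : Int)) = ((d * d : Nat) : Int) from by push_cast; ring]
  rw [PySem.List.pyRange_zero_natCast d, PySem.List.pyRange_zero_natCast (d * d)]
  rw [List.foldl_map, List.foldl_map, pv_range_mul d d, List.foldl_flatMap]
  apply pv_foldl_rel (pvRel (d : Int))
  · exact ⟨rfl, Or.inl ⟨rfl, rfl, rfl, rfl⟩⟩
  · intro s t r hr hRst
    rw [List.foldl_map (f := fun cc => r * d + cc), List.foldl_map (f := fun k : Nat => (k : Int))]
    apply pv_foldl_rel (pvRel (d : Int)) _ _ _ hRst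
    intro s' t' cc hcc hR
    have hrd : r < d := List.mem_range.mp hr
    have hcd : cc < d := List.mem_range.mp hcc
    have hread : PySem.List.pyGetD (pvFlatten (d : Int) moves) ((r * d + cc : Nat) : Int) 0 =
        pvGridGet moves (r : Int) (cc : Int) := by
      have h0 : (0 : Int) ≤ ((r * d + cc : Nat) : Int) := by positivity
      have h1 : ((r * d + cc : Nat) : Int) < (d : Int) * d := by push_cast; nlinarith
      rw [pv_flat_get moves h0 h1]
      have : ((r * d + cc : Nat) : Int) = (r : Int) * (d : Int) + (cc : Int) := by push_cast; ring
      rw [this, (pv_fdiv_eq (by positivity) (by exact_mod_cast hrd) (by positivity) (by exact_mod_cast hcd)).1,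
        (pv_fdiv_eq (by positivity) (by exact_mod_cast hrd) (by positivity) (by exact_mod_cast hcd)).2]
    obtain ⟨h1, h2⟩ := hR
    have hs1 : 0 ≤ s'.1 := by rcases h2 with ⟨_, h, _, _⟩ | ⟨_, _, _, _, _, h⟩ <;> omega
    rw [hread, ← h1]
    by_cases hlt : s'.1 < pvGridGet moves (r : Int) (cc : Int)
    · rw [if_pos hlt, if_pos hlt]
      refine ⟨rfl, Or.inr ⟨?_, ?_, ?_, ?_, ?_, ?_⟩⟩
      · positivity
      · show (r : Int) < (d : Int); exact_mod_cast hrd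
      · positivity
      · show (cc : Int) < (d : Int); exact_mod_cast hcd
      · push_cast; ring
      · show (0 : Int) < pvGridGet moves (r : Int) (cc : Int); omega
    · rw [if_neg hlt, if_neg hlt]
      exact ⟨h1, h2⟩

theorem pv_decr_corr (d : Nat) (r c : Int) (l : List (Int × Int)) :
    ∀ (mv : List (List Int)), mv.length = d → (∀ row ∈ mv, d ≤ row.length) →
    (∀ p ∈ l, 0 ≤ r + p.1 ∧ r + p.1 < (d : Int) ∧ 0 ≤ c + p.2 ∧ c + p.2 < (d : Int)) →
    pvFlatten (d : Int)
        (l.foldl (fun mv dd => if pvGridGet mv (r + dd.1) (c + dd.2) > 0 then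
            pvGridSet mv (r + dd.1) (c + dd.2) (pvGridGet mv (r + dd.1) (c + dd.2) - 1) else mv) mv) =
      l.foldl (fun fl dd => if PySem.List.pyGetD fl ((r + dd.1) * (d : Int) + (c + dd.2)) 0 > 0 then
          PySem.List.pySetD fl ((r + dd.1) * (d : Int) + (c + dd.2))
            (PySem.List.pyGetD fl ((r + dd.1) * (d : Int) + (c + dd.2)) 0 - 1) else fl)
        (pvFlatten (d : Int) mv) ∧
      (l.foldl (fun mv dd => if pvGridGet mv (r + dd.1) (c + dd.2) > 0 then
          pvGridSet mv (r + dd.1) (c + dd.2) (pvGridGet mv (r + dd.1) (c + dd.2) - 1) else mv) mv).length = d ∧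
      ∀ row ∈ (l.foldl (fun mv dd => if pvGridGet mv (r + dd.1) (c + dd.2) > 0 then
          pvGridSet mv (r + dd.1) (c + dd.2) (pvGridGet mv (r + dd.1) (c + dd.2) - 1) else mv) mv),
        d ≤ row.length := by
  induction l with
  | nil => intro mv h1 h2 _; exact ⟨rfl, h1, h2⟩
  | cons dd tl ih =>
    intro mv h1 h2 hb
    obtain ⟨hb1, hb2, hb3, hb4⟩ := hb dd List.mem_cons_self
    have hbtl := fun p hp => hb p (List.mem_cons_of_mem _ hp)
    have hidx0 : 0 ≤ (r + dd.1) * (d : Int) + (c + dd.2) := by nlinarith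
    have hidx1 : (r + dd.1) * (d : Int) + (c + dd.2) < (d : Int) * d := by nlinarith
    have hread : PySem.List.pyGetD (pvFlatten (d : Int) mv) ((r + dd.1) * (d : Int) + (c + dd.2)) 0 =
        pvGridGet mv (r + dd.1) (c + dd.2) := by
      rw [pv_flat_get mv hidx0 hidx1,
        (pv_fdiv_eq hb1 hb2 hb3 hb4).1, (pv_fdiv_eq hb1 hb2 hb3 hb4).2]
    simp only [List.foldl_cons]
    rw [hread]
    by_cases hpos : pvGridGet mv (r + dd.1) (c + dd.2) > 0
    · rw [if_pos hpos, if_pos hpos]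
      obtain ⟨hlen', hrows'⟩ := pv_rows_set mv (r + dd.1) (c + dd.2)
        (pvGridGet mv (r + dd.1) (c + dd.2) - 1) d h1 h2 hb1 hb2 hb3
      have hset := pv_flatten_set mv (r + dd.1) (c + dd.2)
        (pvGridGet mv (r + dd.1) (c + dd.2) - 1) d h1 h2 hb1 hb2 hb3 hb4
      rw [← hset]
      exact ih _ hlen' hrows' hbtl
    · rw [if_neg hpos, if_neg hpos]
      exact ih mv h1 h2 hbtl

theorem pv_bloop_shift (f : Nat) : ∀ (dim : Int) (flat : List Int) (k : Int),
    pvBLoop f dim flat k = k + pvBLoop f dim flat 0 := by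
  induction f with
  | zero => intro dim flat k; simp [pvBLoop]
  | succ f ih =>
    intro dim flat k
    simp only [pvBLoop]
    by_cases hb : (pvScan (dim * dim) flat).2 < 0
    · rw [if_pos hb, if_pos hb]; omega
    · rw [if_neg hb, if_neg hb]
      rw [ih _ _ (k + 1), ih _ _ (0 + 1)]
      omega

theorem pv_b_body (D rA cA : Int) (flat1 : List Int) :
    pvDeltas.foldl (fun fl dd =>
        if 0 ≤ rA + dd.1 ∧ rA + dd.1 < D ∧ 0 ≤ cA + dd.2 ∧ cA + dd.2 < D ∧
            PySem.List.pyGetD fl ((rA + dd.1) * D + (cA + dd.2)) 0 > 0 then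
          PySem.List.pySetD fl ((rA + dd.1) * D + (cA + dd.2))
            (PySem.List.pyGetD fl ((rA + dd.1) * D + (cA + dd.2)) 0 - 1) else fl) flat1 =
    (pvDeltas.filter (fun dd =>
        decide (0 ≤ rA + dd.1 ∧ rA + dd.1 < D ∧ 0 ≤ cA + dd.2 ∧ cA + dd.2 < D))).foldl
      (fun fl dd => if PySem.List.pyGetD fl ((rA + dd.1) * D + (cA + dd.2)) 0 > 0 then
        PySem.List.pySetD fl ((rA + dd.1) * D + (cA + dd.2))
          (PySem.List.pyGetD fl ((rA + dd.1) * D + (cA + dd.2)) 0 - 1) else fl) flat1 := by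
  rw [← PySem.List.foldl_ite_eq_foldl_filter
    (p := fun dd : Int × Int => 0 ≤ rA + dd.1 ∧ rA + dd.1 < D ∧ 0 ≤ cA + dd.2 ∧ cA + dd.2 < D)]
  apply PySem.List.foldl_congr_mem
  intro acc x _
  by_cases h1 : 0 ≤ rA + x.1 ∧ rA + x.1 < D ∧ 0 ≤ cA + x.2 ∧ cA + x.2 < D
  · rw [if_pos h1]
    by_cases h2 : PySem.List.pyGetD acc ((rA + x.1) * D + (cA + x.2)) 0 > 0
    · rw [if_pos ⟨h1.1, h1.2.1, h1.2.2.1, h1.2.2.2, h2⟩, if_pos h2]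
    · rw [if_neg (fun hcon => h2 hcon.2.2.2.2), if_neg h2]
  · rw [if_neg h1, if_neg (fun hcon => h1 ⟨hcon.1, hcon.2.1, hcon.2.2.1, hcon.2.2.2.1⟩)]

theorem pv_main (f : Nat) : ∀ (matrix : List (List String)) (mv : List (List Int)) (nm : Int),
    (∀ row ∈ mv, mv.length ≤ row.length) →
    pvKnightRec f matrix mv nm = nm + pvBLoop f (mv.length : Int) (pvFlatten (mv.length : Int) mv) 0 := by
  induction f with
  | zero => intro matrix mv nm _; simp [pvKnightRec, pvBLoop]
  | succ f ih =>
    intro matrix mv nm hrows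
    obtain ⟨hEq1, hcase⟩ := pv_scan_corr mv mv.length rfl
    simp only [pvKnightRec, pvBLoop]
    rcases hcase with ⟨ht, hs0, _, _⟩ | ⟨hrb0, hrb1, hcb0, hcb1, hbi, hpos⟩
    · rw [if_neg (by omega), if_pos (by omega)]
      omega
    · set D : Int := (mv.length : Int) with hD
      set rA := (max_removal_port (mv.length : Int) mv).2.1 with hrA
      set cA := (max_removal_port (mv.length : Int) mv).2.2 with hcA
      have hDpos : 0 < D := lt_of_le_of_lt hrb0 hrb1
      have hbige : 0 ≤ (pvScan (D * D) (pvFlatten D mv)).2 := by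
        rw [hbi]; exact add_nonneg (mul_nonneg hrb0 (le_of_lt hDpos)) hcb0
      rw [if_pos (by omega), if_neg (by omega)]
      rw [hbi]
      rw [(pv_fdiv_eq hrb0 hrb1 hcb0 hcb1).1, (pv_fdiv_eq hrb0 hrb1 hcb0 hcb1).2]
      -- the zeroed cell
      have hset0 := pv_flatten_set mv rA cA 0 mv.length rfl hrows hrb0 hrb1 hcb0 hcb1
      rw [← hset0]
      obtain ⟨hlen1, hrows1⟩ := pv_rows_set mv rA cA 0 mv.length rfl hrows hrb0 hrb1 hcb0
      -- reshape the two decrement folds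
      rw [pv_b_body]
      simp only [pv_available_eq, List.foldl_map]
      have hmemb : ∀ p ∈ pvDeltas.filter (fun dd =>
          decide (0 ≤ rA + dd.1 ∧ rA + dd.1 < D ∧ 0 ≤ cA + dd.2 ∧ cA + dd.2 < D)),
          0 ≤ rA + p.1 ∧ rA + p.1 < D ∧ 0 ≤ cA + p.2 ∧ cA + p.2 < D := by
        intro p hp
        exact of_decide_eq_true (List.mem_filter.mp hp).2
      obtain ⟨hflat2, hlen2, hrows2⟩ := pv_decr_corr mv.length rA cA
        (pvDeltas.filter (fun dd =>
          decide (0 ≤ rA + dd.1 ∧ rA + dd.1 < D ∧ 0 ≤ cA + dd.2 ∧ cA + dd.2 < D)))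
        (pvGridSet mv rA cA 0) hlen1 hrows1 hmemb
      rw [← hflat2]
      have hrows2' : ∀ row ∈ (pvDeltas.filter (fun dd =>
          decide (0 ≤ rA + dd.1 ∧ rA + dd.1 < D ∧ 0 ≤ cA + dd.2 ∧ cA + dd.2 < D))).foldl
            (fun mv dd => if pvGridGet mv (rA + dd.1) (cA + dd.2) > 0 then
              pvGridSet mv (rA + dd.1) (cA + dd.2) (pvGridGet mv (rA + dd.1) (cA + dd.2) - 1) else mv)
            (pvGridSet mv rA cA 0),
          ((pvDeltas.filter (fun dd =>
            decide (0 ≤ rA + dd.1 ∧ rA + dd.1 < D ∧ 0 ≤ cA + dd.2 ∧ cA + dd.2 < D))).foldl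
            (fun mv dd => if pvGridGet mv (rA + dd.1) (cA + dd.2) > 0 then
              pvGridSet mv (rA + dd.1) (cA + dd.2) (pvGridGet mv (rA + dd.1) (cA + dd.2) - 1) else mv)
            (pvGridSet mv rA cA 0)).length ≤ row.length := by
        intro row hrow; rw [hlen2]; exact hrows2 row hrow
      rw [ih _ _ (nm + 1) hrows2', hlen2, pv_bloop_shift f D _ (0 + 1)]
      simp only [← hD]
      omega

-- ===== VERDICT (by name: the statement is the Claim_ definition above) =====
theorem knight_game_2_spec : Claim_equal_knight_game_2 := by
  intro matrix moves number_moves _hDom hPre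
  unfold Spec_knight_game_2
  have hmain := pv_main (moves.length * moves.length + 1) matrix moves number_moves hPre.1
  have hfuel : (((moves.length : Int)) * (moves.length : Int) + 1).toNat
      = moves.length * moves.length + 1 := by
    have h : ((moves.length : Int)) * (moves.length : Int) + 1
        = ((moves.length * moves.length + 1 : Nat) : Int) := by push_cast; ring
    rw [h, Int.toNat_natCast]
  unfold knight_game_2
  rw [hmain]
  show _ = number_moves + pvBLoop (((moves.length : Int)) * (moves.length : Int) + 1).toNat
      (moves.length : Int) (pvFlatten (moves.length : Int) moves) 0
  rw [hfuel]
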